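-- pv_equiv track=rewrite | github.com/steveazzolin/reconsidering-faithfulness-in-gnns | SelfExplainable/GiSST/ourutils/evaluate_metric.py | normalize_belonging
-- ===== SOURCE A (Python) =====
-- def normalize_belonging(belonging):
--     #TODO: make more efficient
--     ret = []
--     i = -1
--     for j , elem in enumerate(belonging):
--         if len(ret) > 0 and elem == belonging[j-1]:
--             ret.append(i)
--         else:
--             i += 1
--             ret.append(i)
--     return ret
-- ===== SOURCE B (Python) =====
-- def normalize_belonging(belonging):
--     # Two-pass group-then-expand: run-length encode, then emit each group's index once per member.
--     runs = []
--     for elem in belonging: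
--         if runs and runs[-1][0] == elem:
--             runs[-1][1] += 1
--         else:
--             runs.append([elem, 1])
--     out = []
--     for idx, (_, cnt) in enumerate(runs):
--         out.extend([idx] * cnt)
--     return out
-- ===== Notes on version B (the rewrite author's own statement) =====
-- stated objective: alternative
-- what changed: Replaces A's single flat loop that compares each element with its predecessor by a two-pass group-then-expand decomposition: first run-length encode the list, then emit each run's index once per member.
import Mathlib
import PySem

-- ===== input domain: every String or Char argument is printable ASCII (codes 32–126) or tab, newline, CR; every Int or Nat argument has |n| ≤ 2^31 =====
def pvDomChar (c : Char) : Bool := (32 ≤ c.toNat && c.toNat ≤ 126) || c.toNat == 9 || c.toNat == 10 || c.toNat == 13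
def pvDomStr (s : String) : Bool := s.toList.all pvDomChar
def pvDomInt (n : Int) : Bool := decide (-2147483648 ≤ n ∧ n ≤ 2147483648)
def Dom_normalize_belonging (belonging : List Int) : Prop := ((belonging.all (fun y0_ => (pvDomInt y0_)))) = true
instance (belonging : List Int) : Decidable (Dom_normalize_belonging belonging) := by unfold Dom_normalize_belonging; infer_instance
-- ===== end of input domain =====

-- B replaces A's flat predecessor-comparison loop by a two-pass group-then-expand
-- (run-length encode, then emit each group's index once per member); objective: alternative decomposition.

-- ===== PORT A =====
def normalize_belonging (belonging : List Int) : List Int :=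
  ((PySem.List.enumerate belonging 0).foldl
    (fun (st : List Int × Int) je =>
      if 0 < st.1.length ∧ PySem.List.pyGet? belonging (je.1 - 1) = some je.2 then
        (st.1 ++ [st.2], st.2)
      else
        (st.1 ++ [st.2 + 1], st.2 + 1)) ([], -1)).1

-- ===== PORT B =====
-- one step of B's first loop: extend the run-length encoding by one element
def nbStepB (runs : List (Int × Int)) (elem : Int) : List (Int × Int) :=
  match runs.getLast? with
  | some (e, c) => if e = elem then runs.dropLast ++ [(e, c + 1)] else runs ++ [(elem, 1)]
  | none => [(elem, 1)]

def normalize_belonging_alt (belonging : List Int) : List Int :=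
  let runs := belonging.foldl nbStepB []
  (PySem.List.enumerate runs 0).foldl
    (fun (out : List Int) ic => out ++ PySem.List.pyRepeat [ic.1] ic.2.2) []

-- ===== PRECONDITION & SPEC =====
def Spec_normalize_belonging (belonging : List Int) (out : List Int) : Prop := out = normalize_belonging_alt belonging
instance (belonging : List Int) (out : List Int) : Decidable (Spec_normalize_belonging belonging out) := by unfold Spec_normalize_belonging; infer_instance

-- ===== CLAIM (what is proved, stated in full; the proofs are below) =====
def Claim_equal_normalize_belonging : Prop := ∀ (belonging : List Int), Dom_normalize_belonging belonging → Spec_normalize_belonging belonging (normalize_belonging belonging)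

-- ===== LEMMAS AND PROOFS =====

-- common reference recursion: group index stream given previous element and current index
def nbGo (prev : Option Int) (i : Int) : List Int → List Int
  | [] => []
  | x :: xs => if prev = some x then i :: nbGo (some x) i xs else (i + 1) :: nbGo (some x) (i + 1) xs

-- expansion of a run-length encoding into group indices (flatMap form of B's second loop)
def nbExpand (rs : List (Int × Int)) : List Int :=
  (PySem.List.enumerate rs 0).flatMap (fun ic => PySem.List.pyRepeat [ic.1] ic.2.2)

theorem nbExpand_concat (rs : List (Int × Int)) (r : Int × Int) :
    nbExpand (rs ++ [r]) = nbExpand rs ++ PySem.List.pyRepeat [(rs.length : Int)] r.2 := by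
  simp [nbExpand, PySem.List.enumerate_append, PySem.List.enumerate_cons]

theorem nbRepeat_succ (idx c : Int) (hc : 0 ≤ c) :
    PySem.List.pyRepeat [idx] (c + 1) = PySem.List.pyRepeat [idx] c ++ [idx] := by
  rw [PySem.List.pyRepeat_singleton, PySem.List.pyRepeat_singleton]
  have : (c + 1).toNat = c.toNat + 1 := by omega
  rw [this, List.replicate_succ']

-- A's fold over the enumerated list, generalized over a processed prefix
theorem nbA_gen (L : List Int) : ∀ (suffix pre ret : List Int) (i : Int),
    L = pre ++ suffix → ret.length = pre.length →
    ((PySem.List.enumerate suffix (pre.length : Int)).foldl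
      (fun (st : List Int × Int) je =>
        if 0 < st.1.length ∧ PySem.List.pyGet? L (je.1 - 1) = some je.2 then
          (st.1 ++ [st.2], st.2)
        else
          (st.1 ++ [st.2 + 1], st.2 + 1)) (ret, i)).1
    = ret ++ nbGo pre.getLast? i suffix := by
  intro suffix
  induction suffix with
  | nil => intro pre ret i _ _; simp [PySem.List.enumerate_nil, nbGo]
  | cons x xs ih =>
    intro pre ret i hL hlen
    rw [PySem.List.enumerate_cons, List.foldl_cons]
    have hnext : ((pre.length : Int) + 1) = ((pre ++ [x]).length : Int) := by
      simp
    by_cases hpre : pre = []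
    · subst hpre
      simp only [List.length_nil] at hlen
      have hret : ret = [] := List.eq_nil_of_length_eq_zero hlen
      subst hret
      have : ¬ (0 < ([] : List Int).length ∧ PySem.List.pyGet? L (((0:Nat) : Int) - 1) = some x) := by
        simp
      rw [if_neg (by simp)]
      rw [hnext]
      rw [ih ([] ++ [x]) ([] ++ [i + 1]) (i + 1) (by simpa using hL) (by simp)]
      simp [nbGo]
    · -- pre nonempty: the looked-up element is pre's last
      have hlenpos : 0 < pre.length := List.length_pos_of_ne_nil hpre
      have hget : PySem.List.pyGet? L ((pre.length : Int) - 1) = pre.getLast? := by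
        have h1 : ((pre.length : Int) - 1) = ((pre.length - 1 : Nat) : Int) := by omega
        rw [h1, PySem.List.pyGet?_natCast, hL]
        rw [List.getElem?_append_left (by omega)]
        rw [List.getLast?_eq_getElem?]
      have hretpos : 0 < ret.length := by omega
      by_cases heq : pre.getLast? = some x
      · rw [if_pos ⟨hretpos, by rw [hget]; exact heq⟩]
        rw [hnext, ih (pre ++ [x]) (ret ++ [i]) i (by simpa using hL) (by simp [hlen])]
        simp [nbGo, heq]
      · rw [if_neg (by rw [hget]; exact fun h => heq h.2)]
        rw [hnext, ih (pre ++ [x]) (ret ++ [i + 1]) (i + 1) (by simpa using hL) (by simp [hlen])]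
        simp [nbGo, heq]

theorem nbA_eq_go (belonging : List Int) :
    normalize_belonging belonging = nbGo none (-1) belonging := by
  unfold normalize_belonging
  have := nbA_gen belonging belonging [] [] (-1) (by simp) (by simp)
  simpa using this

-- B's run-building fold, related to the reference recursion
theorem nbB_gen : ∀ (xs : List Int) (rs : List (Int × Int)) (e c : Int), 1 ≤ c →
    nbExpand (xs.foldl nbStepB (rs ++ [(e, c)]))
      = nbExpand (rs ++ [(e, c)]) ++ nbGo (some e) (rs.length : Int) xs := by
  intro xs
  induction xs with
  | nil => intro rs e c _; simp [nbGo]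
  | cons x xs ih =>
    intro rs e c hc
    rw [List.foldl_cons]
    have hlast : (rs ++ [(e, c)]).getLast? = some (e, c) := by simp
    by_cases heq : e = x
    · have hstep : nbStepB (rs ++ [(e, c)]) x = rs ++ [(e, c + 1)] := by
        simp [nbStepB, heq]
      rw [hstep, ih rs e (c + 1) (by omega)]
      rw [nbExpand_concat rs (e, c + 1), nbExpand_concat rs (e, c)]
      rw [show ((e, c + 1) : Int × Int).2 = c + 1 from rfl, nbRepeat_succ _ c (by omega)]
      simp [nbGo, heq]
    · have hstep : nbStepB (rs ++ [(e, c)]) x = (rs ++ [(e, c)]) ++ [(x, 1)] := by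
        simp [nbStepB, heq]
      rw [hstep, ih (rs ++ [(e, c)]) x 1 (by omega)]
      rw [nbExpand_concat (rs ++ [(e, c)]) (x, 1)]
      have h1 : PySem.List.pyRepeat [(((rs ++ [(e, c)]).length : Nat) : Int)] ((x, 1) : Int × Int).2
          = [((rs.length : Int) + 1)] := by
        rw [PySem.List.pyRepeat_singleton]; simp
      rw [h1]
      have hlen : (((rs ++ [(e, c)]).length : Nat) : Int) = (rs.length : Int) + 1 := by simp
      simp [nbGo, heq]

theorem nbB_eq_go (belonging : List Int) :
    normalize_belonging_alt belonging = nbGo none (-1) belonging := by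
  unfold normalize_belonging_alt
  rw [PySem.List.foldl_append_eq_flatMap]
  show nbExpand (belonging.foldl nbStepB []) = _
  cases belonging with
  | nil => simp [nbExpand, nbGo, PySem.List.enumerate_nil]
  | cons y ys =>
    rw [List.foldl_cons]
    have hstep : nbStepB [] y = [] ++ [(y, 1)] := by simp [nbStepB]
    rw [hstep, nbB_gen ys [] y 1 (by omega)]
    have : nbExpand ([] ++ [(y, 1)]) = [0] := by
      simp [nbExpand, PySem.List.enumerate_cons, PySem.List.enumerate_nil,
        PySem.List.pyRepeat_singleton]
    rw [this]
    simp [nbGo]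

-- ===== VERDICT (by name: the statement is the Claim_ definition above) =====
theorem normalize_belonging_spec : Claim_equal_normalize_belonging := by
  intro belonging _
  show normalize_belonging belonging = normalize_belonging_alt belonging
  rw [nbA_eq_go, nbB_eq_go]
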